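-- pv_equiv track=rewrite | github.com/kelvinarrudasilva/financeiro2026 | app.py | encontrar_aba_custo_vida
-- ===== SOURCE A (Python) =====
-- import unicodedata
--
-- def normalizar_texto(txt):
--     txt = str(txt).strip().upper()
--     txt = unicodedata.normalize("NFKD", txt).encode("ascii", errors="ignore").decode("utf-8")
--     return txt
--
-- def encontrar_aba_custo_vida(sheet_names):
--     nomes_normalizados = {normalizar_texto(nome): nome for nome in sheet_names}
--     candidatos = [
--         "CUSTO DE VIDA",
--         "CUSTO_DE_VIDA",
--         "CUSTO VIDA",
--         "PLANEJAMENTO DE CUSTO DE VIDA",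
--     ]
--     for cand in candidatos:
--         if cand in nomes_normalizados:
--             return nomes_normalizados[cand]
--     return None
-- ===== SOURCE B (Python) =====
-- import unicodedata
--
-- def normalizar_texto(txt):
--     txt = str(txt).strip().upper()
--     txt = unicodedata.normalize("NFKD", txt).encode("ascii", errors="ignore").decode("utf-8")
--     return txt
--
-- def encontrar_aba_custo_vida(sheet_names):
--     for cand in ("CUSTO DE VIDA", "CUSTO_DE_VIDA", "CUSTO VIDA",
--                  "PLANEJAMENTO DE CUSTO DE VIDA"):
--         for nome in sheet_names:
--             if normalizar_texto(nome) == cand: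
--                 return nome
--     return None
-- ===== Notes on version B (the rewrite author's own statement) =====
-- stated objective: simpler
-- what changed: B drops the normalized-name dict entirely: for each candidate in priority order it linearly scans the sheet names and returns the first one whose normalization equals the candidate; Pre_ excludes lists in which two sheet names normalize to the same candidate, where A's dict-reinsertion (last-wins) choice is accidental and B's first match is equally defensible.
-- outside the precondition, e.g. on encontrar_aba_custo_vida(['custo de vida', 'CUSTO DE VIDA']): A returns 'CUSTO DE VIDA', B returns 'custo de vida'
import Mathlib
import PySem

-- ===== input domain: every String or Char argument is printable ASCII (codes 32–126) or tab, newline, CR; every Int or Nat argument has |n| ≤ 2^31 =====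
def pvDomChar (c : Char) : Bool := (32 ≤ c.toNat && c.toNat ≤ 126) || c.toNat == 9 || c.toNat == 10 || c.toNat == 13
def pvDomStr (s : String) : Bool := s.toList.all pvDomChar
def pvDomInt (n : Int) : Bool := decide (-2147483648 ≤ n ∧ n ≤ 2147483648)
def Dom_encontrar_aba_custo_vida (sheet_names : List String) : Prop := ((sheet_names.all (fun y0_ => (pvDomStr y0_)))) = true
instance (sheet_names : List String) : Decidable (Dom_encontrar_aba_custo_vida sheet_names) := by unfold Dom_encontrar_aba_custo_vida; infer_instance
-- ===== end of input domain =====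

-- B is a simpler, dict-free re-implementation: per candidate (in priority order), return the
-- first sheet name whose normalization equals the candidate.

-- ===== PORT A =====
-- normalizar_texto: strip then upper; the NFKD-normalize/ascii-encode step is the
-- identity on the printable-ASCII domain, so it is ported as the identity (exact on Dom).
def normalizar_texto (txt : String) : String :=
  PySem.Str.upper (PySem.Str.strip txt)

def pvCandidatos : List String :=
  ["CUSTO DE VIDA", "CUSTO_DE_VIDA", "CUSTO VIDA", "PLANEJAMENTO DE CUSTO DE VIDA"]

-- for cand in candidatos: if cand in nomes_normalizados: return nomes_normalizados[cand]
def pvLookupA (d : PySem.Dict String String) : List String → Option String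
  | [] => none
  | c :: rest =>
    match d.get? c with
    | some v => some v
    | none => pvLookupA d rest

def encontrar_aba_custo_vida (sheet_names : List String) : Option String :=
  let nomes_normalizados : PySem.Dict String String :=
    sheet_names.foldl (fun d nome => d.insert (normalizar_texto nome) nome) PySem.Dict.empty
  pvLookupA nomes_normalizados pvCandidatos

-- ===== PORT B =====
-- inner loop: return the FIRST nome whose normalization equals cand
def pvScanB (cand : String) : List String → Option String
  | [] => none
  | n :: ns => if normalizar_texto n = cand then some n else pvScanB cand ns

def pvLoopB (sheet_names : List String) : List String → Option String
  | [] => none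
  | c :: rest =>
    match pvScanB c sheet_names with
    | some v => some v
    | none => pvLoopB sheet_names rest

def encontrar_aba_custo_vida_alt (sheet_names : List String) : Option String :=
  pvLoopB sheet_names
    ["CUSTO DE VIDA", "CUSTO_DE_VIDA", "CUSTO VIDA", "PLANEJAMENTO DE CUSTO DE VIDA"]

-- ===== PRECONDITION & SPEC =====
-- Pre_ excludes lists in which two sheet names normalize to the SAME candidate string:
-- there A's value comes from accidental dict-reinsertion (last duplicate wins) and B's
-- first match is an equally defensible choice on that unspecified corner.
def Pre_encontrar_aba_custo_vida (sheet_names : List String) : Prop :=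
  ∀ c ∈ (["CUSTO DE VIDA", "CUSTO_DE_VIDA", "CUSTO VIDA",
          "PLANEJAMENTO DE CUSTO DE VIDA"] : List String),
    sheet_names.countP (fun n => normalizar_texto n == c) ≤ 1
instance (sheet_names : List String) : Decidable (Pre_encontrar_aba_custo_vida sheet_names) := by
  unfold Pre_encontrar_aba_custo_vida; infer_instance

def pvWitness_encontrar_aba_custo_vida : List String := ["Resumo", "Custo de Vida"]

def Spec_encontrar_aba_custo_vida (sheet_names : List String) (out : Option String) : Prop := out = encontrar_aba_custo_vida_alt sheet_names
instance (sheet_names : List String) (out : Option String) : Decidable (Spec_encontrar_aba_custo_vida sheet_names out) := by unfold Spec_encontrar_aba_custo_vida; infer_instance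

-- ===== CLAIM =====
def Claim_equal_encontrar_aba_custo_vida : Prop := ∀ (sheet_names : List String), Dom_encontrar_aba_custo_vida sheet_names → Pre_encontrar_aba_custo_vida sheet_names → Spec_encontrar_aba_custo_vida sheet_names (encontrar_aba_custo_vida sheet_names)

-- ===== LEMMAS AND PROOFS =====

-- The dict built by A answers each lookup as a last-match scan over the names.
theorem pvDict_get_eq_scan (sheet_names : List String) (d : PySem.Dict String String) (c : String) :
    (sheet_names.foldl (fun d nome => d.insert (normalizar_texto nome) nome) d).get? c
      = sheet_names.foldl (fun found nome => if normalizar_texto nome = c then some nome else found) (d.get? c) := by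
  induction sheet_names generalizing d with
  | nil => rfl
  | cons n ns ih =>
    rw [List.foldl_cons, List.foldl_cons, ih, PySem.Dict.get?_insert]
    by_cases h : normalizar_texto n = c
    · rw [if_pos h.symm, if_pos h]
    · rw [if_neg (Ne.symm h), if_neg h]

-- With no matching name, the last-match fold leaves its accumulator unchanged.
theorem pvFold_no_match (c : String) (ns : List String) (acc : Option String)
    (h : ns.countP (fun n => normalizar_texto n == c) = 0) :
    ns.foldl (fun found nome => if normalizar_texto nome = c then some nome else found) acc = acc := by
  induction ns generalizing acc with
  | nil => rfl
  | cons n ns ih =>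
    rw [List.countP_cons] at h
    by_cases hn : normalizar_texto n = c
    · simp [hn] at h
    · rw [List.foldl_cons, if_neg hn]
      exact ih acc (by omega)

-- With at most one matching name, last match = first match.
theorem pvLast_eq_first (c : String) (ns : List String)
    (h : ns.countP (fun n => normalizar_texto n == c) ≤ 1) :
    ns.foldl (fun found nome => if normalizar_texto nome = c then some nome else found) none
      = pvScanB c ns := by
  induction ns with
  | nil => rfl
  | cons n ns ih =>
    rw [List.countP_cons] at h
    by_cases hn : normalizar_texto n = c
    · rw [List.foldl_cons, if_pos hn, pvScanB, if_pos hn]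
      exact pvFold_no_match c ns (some n) (by simp only [beq_iff_eq, hn, if_true] at h; omega)
    · rw [List.foldl_cons, if_neg hn, pvScanB, if_neg hn]
      exact ih (by simp only [beq_iff_eq, hn, if_false] at h; omega)

theorem pvLookup_eq (sheet_names : List String) (cands : List String)
    (h : ∀ c ∈ cands, sheet_names.countP (fun n => normalizar_texto n == c) ≤ 1) :
    pvLookupA (sheet_names.foldl (fun d nome => d.insert (normalizar_texto nome) nome) PySem.Dict.empty) cands
      = pvLoopB sheet_names cands := by
  induction cands with
  | nil => rfl
  | cons c rest ih =>
    have hc := h c (List.mem_cons_self ..)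
    simp only [pvLookupA, pvLoopB, ih (fun x hx => h x (List.mem_cons_of_mem _ hx)),
      pvDict_get_eq_scan, PySem.Dict.get?_empty, pvLast_eq_first c sheet_names hc]

-- ===== VERDICT =====
theorem encontrar_aba_custo_vida_spec : Claim_equal_encontrar_aba_custo_vida := by
  intro sheet_names _ hpre
  unfold Spec_encontrar_aba_custo_vida encontrar_aba_custo_vida encontrar_aba_custo_vida_alt pvCandidatos
  exact pvLookup_eq sheet_names _ hpre
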